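-- pv_equiv track=rewrite | github.com/de-yarp/hop | utils/helpers.py | _init_guards_quantity_per_weekday
-- ===== SOURCE A (Python) =====
-- def _init_guards_quantity_per_weekday(
--     guards: dict[int, dict[str, set[int]]],
-- ) -> dict[int, int]:
--     quantity_per_weekday: dict[int, int] = {1: 0, 2: 0, 3: 0, 4: 0, 5: 0, 6: 0, 7: 0}
--     week = range(1, 8)
--
--     for idx in guards:
--         forbiddens = set(guards[idx]["forbiddens"])
--         for d in week:
--             if d not in forbiddens:
--                 quantity_per_weekday[d] += 1
--
--     return quantity_per_weekday
-- ===== SOURCE B (Python) =====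
-- def _init_guards_quantity_per_weekday(
--     guards: dict[int, dict[str, set[int]]],
-- ) -> dict[int, int]:
--     forbidden_count: dict[int, int] = {}
--     for guard in guards.values():
--         for d in set(guard["forbiddens"]):
--             forbidden_count[d] = forbidden_count.get(d, 0) + 1
--     n = len(guards)
--     return {d: n - forbidden_count.get(d, 0) for d in range(1, 8)}
-- ===== Notes on version B (the rewrite author's own statement) =====
-- stated objective: alternative
-- what changed: Instead of testing all 7 weekdays against every guard's forbidden set and incrementing a preinitialized dict, B builds a counter of how many guards forbid each day in one pass and then emits the result as a comprehension n - counter[d] over the week.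
import Mathlib
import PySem

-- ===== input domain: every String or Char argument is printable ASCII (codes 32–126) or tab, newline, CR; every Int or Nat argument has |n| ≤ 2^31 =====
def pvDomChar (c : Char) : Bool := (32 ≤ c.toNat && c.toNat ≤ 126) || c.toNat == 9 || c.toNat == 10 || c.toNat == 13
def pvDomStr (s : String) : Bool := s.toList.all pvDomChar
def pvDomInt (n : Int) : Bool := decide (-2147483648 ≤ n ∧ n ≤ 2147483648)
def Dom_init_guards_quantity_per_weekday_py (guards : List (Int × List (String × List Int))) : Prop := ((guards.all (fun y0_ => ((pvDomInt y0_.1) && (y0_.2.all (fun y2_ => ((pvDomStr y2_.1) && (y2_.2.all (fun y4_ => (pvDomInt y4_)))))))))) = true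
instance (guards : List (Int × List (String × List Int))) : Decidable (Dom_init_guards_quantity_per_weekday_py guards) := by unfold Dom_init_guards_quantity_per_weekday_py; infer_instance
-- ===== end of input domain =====

-- B replaces A's "test all 7 weekdays against each guard" by counting how many guards forbid each
-- day in a single counter pass and emitting {d: n - counter[d]} over the week (objective: alternative).

-- ===== PORT A =====
def init_guards_quantity_per_weekday_py (guards : List (Int × List (String × List Int))) : List (Int × Int) :=
  let quantity_per_weekday : PySem.Dict Int Int := PySem.Dict.mk [(1,0),(2,0),(3,0),(4,0),(5,0),(6,0),(7,0)]
  let week := PySem.List.pyRange 1 8 1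
  (guards.foldl (fun q g =>
      -- forbiddens = set(guards[idx]["forbiddens"]); getD [] is total, Pre_ rules the KeyError case out
      let forbiddens : PySem.Set Int := PySem.Set.ofList ((PySem.Dict.mk g.2).getD "forbiddens" [])
      week.foldl (fun q d =>
        if PySem.Set.contains forbiddens d = false then PySem.Dict.modify q d 0 (· + 1) else q) q)
    quantity_per_weekday).items

-- ===== PORT B =====
def init_guards_quantity_per_weekday_py_alt (guards : List (Int × List (String × List Int))) : List (Int × Int) :=
  let forbidden_count : PySem.Dict Int Int :=
    guards.foldl (fun fc g =>
        (PySem.Set.ofList ((PySem.Dict.mk g.2).getD "forbiddens" [])).foldl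
          (fun fc d => fc.insert d (fc.getD d 0 + 1)) fc)
      (PySem.Dict.mk [])
  let n : Int := guards.length
  (PySem.List.pyRange 1 8 1).map (fun d => (d, n - forbidden_count.getD d 0))

-- ===== PRECONDITION & SPEC =====
-- Pre_ excludes exactly the inputs on which the Python A raises KeyError: a guard dict without a "forbiddens" key.
def Pre_init_guards_quantity_per_weekday_py (guards : List (Int × List (String × List Int))) : Prop :=
  ∀ g ∈ guards, (PySem.Dict.mk g.2).contains "forbiddens" = true
instance (guards : List (Int × List (String × List Int))) : Decidable (Pre_init_guards_quantity_per_weekday_py guards) := by unfold Pre_init_guards_quantity_per_weekday_py; infer_instance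
def pvWitness_init_guards_quantity_per_weekday_py : (List (Int × List (String × List Int))) :=
  [(0, [("forbiddens", [6, 8])]), (2, [("forbiddens", [])])]

def Spec_init_guards_quantity_per_weekday_py (guards : List (Int × List (String × List Int))) (out : List (Int × Int)) : Prop := out = init_guards_quantity_per_weekday_py_alt guards
instance (guards : List (Int × List (String × List Int))) (out : List (Int × Int)) : Decidable (Spec_init_guards_quantity_per_weekday_py guards out) := by unfold Spec_init_guards_quantity_per_weekday_py; infer_instance

-- ===== CLAIM (what is proved, stated in full; the proofs are below) =====
def Claim_equal_init_guards_quantity_per_weekday_py : Prop := ∀ (guards : List (Int × List (String × List Int))), Dom_init_guards_quantity_per_weekday_py guards → Pre_init_guards_quantity_per_weekday_py guards → Spec_init_guards_quantity_per_weekday_py guards (init_guards_quantity_per_weekday_py guards)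

-- ===== LEMMAS AND PROOFS =====

-- the forbidden set of one guard record
def fset (g : Int × List (String × List Int)) : PySem.Set Int :=
  PySem.Set.ofList ((PySem.Dict.mk g.2).getD "forbiddens" [])

-- how many guards in gs forbid day d
def cntIn (gs : List (Int × List (String × List Int))) (d : Int) : Nat :=
  gs.countP (fun g => PySem.Set.contains (fset g) d)

-- the running state of A's loop: the 7-key weekday dict
def dict7 (a1 a2 a3 a4 a5 a6 a7 : Int) : PySem.Dict Int Int :=
  PySem.Dict.mk [(1,a1),(2,a2),(3,a3),(4,a4),(5,a5),(6,a6),(7,a7)]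

-- A's inner loop (over week = [1..7]) on a dict7 state
theorem stepA (S : PySem.Set Int) (a1 a2 a3 a4 a5 a6 a7 : Int) :
    (PySem.List.pyRange 1 8 1).foldl (fun q d =>
        if PySem.Set.contains S d = false then PySem.Dict.modify q d 0 (· + 1) else q)
      (dict7 a1 a2 a3 a4 a5 a6 a7)
    = dict7 (if PySem.Set.contains S 1 = false then a1+1 else a1)
            (if PySem.Set.contains S 2 = false then a2+1 else a2)
            (if PySem.Set.contains S 3 = false then a3+1 else a3)
            (if PySem.Set.contains S 4 = false then a4+1 else a4)
            (if PySem.Set.contains S 5 = false then a5+1 else a5)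
            (if PySem.Set.contains S 6 = false then a6+1 else a6)
            (if PySem.Set.contains S 7 = false then a7+1 else a7) := by
  have e1 : ∀ b1 b2 b3 b4 b5 b6 b7 : Int,
      (if PySem.Set.contains S 1 = false then PySem.Dict.modify (dict7 b1 b2 b3 b4 b5 b6 b7) 1 0 (· + 1) else dict7 b1 b2 b3 b4 b5 b6 b7)
      = dict7 (if PySem.Set.contains S 1 = false then b1+1 else b1) b2 b3 b4 b5 b6 b7 := by
    intro b1 b2 b3 b4 b5 b6 b7; split_ifs <;> rfl
  have e2 : ∀ b1 b2 b3 b4 b5 b6 b7 : Int,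
      (if PySem.Set.contains S 2 = false then PySem.Dict.modify (dict7 b1 b2 b3 b4 b5 b6 b7) 2 0 (· + 1) else dict7 b1 b2 b3 b4 b5 b6 b7)
      = dict7 b1 (if PySem.Set.contains S 2 = false then b2+1 else b2) b3 b4 b5 b6 b7 := by
    intro b1 b2 b3 b4 b5 b6 b7; split_ifs <;> rfl
  have e3 : ∀ b1 b2 b3 b4 b5 b6 b7 : Int,
      (if PySem.Set.contains S 3 = false then PySem.Dict.modify (dict7 b1 b2 b3 b4 b5 b6 b7) 3 0 (· + 1) else dict7 b1 b2 b3 b4 b5 b6 b7)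
      = dict7 b1 b2 (if PySem.Set.contains S 3 = false then b3+1 else b3) b4 b5 b6 b7 := by
    intro b1 b2 b3 b4 b5 b6 b7; split_ifs <;> rfl
  have e4 : ∀ b1 b2 b3 b4 b5 b6 b7 : Int,
      (if PySem.Set.contains S 4 = false then PySem.Dict.modify (dict7 b1 b2 b3 b4 b5 b6 b7) 4 0 (· + 1) else dict7 b1 b2 b3 b4 b5 b6 b7)
      = dict7 b1 b2 b3 (if PySem.Set.contains S 4 = false then b4+1 else b4) b5 b6 b7 := by
    intro b1 b2 b3 b4 b5 b6 b7; split_ifs <;> rfl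
  have e5 : ∀ b1 b2 b3 b4 b5 b6 b7 : Int,
      (if PySem.Set.contains S 5 = false then PySem.Dict.modify (dict7 b1 b2 b3 b4 b5 b6 b7) 5 0 (· + 1) else dict7 b1 b2 b3 b4 b5 b6 b7)
      = dict7 b1 b2 b3 b4 (if PySem.Set.contains S 5 = false then b5+1 else b5) b6 b7 := by
    intro b1 b2 b3 b4 b5 b6 b7; split_ifs <;> rfl
  have e6 : ∀ b1 b2 b3 b4 b5 b6 b7 : Int,
      (if PySem.Set.contains S 6 = false then PySem.Dict.modify (dict7 b1 b2 b3 b4 b5 b6 b7) 6 0 (· + 1) else dict7 b1 b2 b3 b4 b5 b6 b7)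
      = dict7 b1 b2 b3 b4 b5 (if PySem.Set.contains S 6 = false then b6+1 else b6) b7 := by
    intro b1 b2 b3 b4 b5 b6 b7; split_ifs <;> rfl
  have e7 : ∀ b1 b2 b3 b4 b5 b6 b7 : Int,
      (if PySem.Set.contains S 7 = false then PySem.Dict.modify (dict7 b1 b2 b3 b4 b5 b6 b7) 7 0 (· + 1) else dict7 b1 b2 b3 b4 b5 b6 b7)
      = dict7 b1 b2 b3 b4 b5 b6 (if PySem.Set.contains S 7 = false then b7+1 else b7) := by
    intro b1 b2 b3 b4 b5 b6 b7; split_ifs <;> rfl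
  have hw : PySem.List.pyRange 1 8 1 = [1,2,3,4,5,6,7] := by decide
  rw [hw]; simp only [List.foldl]
  rw [e1, e2, e3, e4, e5, e6, e7]

-- A's whole loop, characterised: each weekday ends at (number of guards) - (guards forbidding it)
theorem lemA (gs : List (Int × List (String × List Int))) :
    ∀ (a1 a2 a3 a4 a5 a6 a7 : Int),
    gs.foldl (fun q g =>
        let forbiddens : PySem.Set Int := PySem.Set.ofList ((PySem.Dict.mk g.2).getD "forbiddens" [])
        (PySem.List.pyRange 1 8 1).foldl (fun q d =>
          if PySem.Set.contains forbiddens d = false then PySem.Dict.modify q d 0 (· + 1) else q) q)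
      (dict7 a1 a2 a3 a4 a5 a6 a7)
    = dict7 (a1 + gs.length - cntIn gs 1) (a2 + gs.length - cntIn gs 2)
            (a3 + gs.length - cntIn gs 3) (a4 + gs.length - cntIn gs 4)
            (a5 + gs.length - cntIn gs 5) (a6 + gs.length - cntIn gs 6)
            (a7 + gs.length - cntIn gs 7) := by
  induction gs with
  | nil => intro a1 a2 a3 a4 a5 a6 a7; simp [List.foldl, cntIn]
  | cons g gs ih =>
    intro a1 a2 a3 a4 a5 a6 a7
    simp only [List.foldl]
    rw [stepA, ih]
    have hc : ∀ d : Int, (cntIn (g :: gs) d : Int)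
        = (if PySem.Set.contains (PySem.Set.ofList ((PySem.Dict.mk g.2).getD "forbiddens" [])) d = false
           then 0 else 1) + cntIn gs d := by
      intro d
      simp only [cntIn, List.countP_cons]
      cases h : PySem.Set.contains (PySem.Set.ofList ((PySem.Dict.mk g.2).getD "forbiddens" [])) d
      · have hm : d ∉ (PySem.Dict.mk g.2).getD "forbiddens" [] := by simpa using h
        simp [fset, hm]
      · have hm : d ∈ (PySem.Dict.mk g.2).getD "forbiddens" [] := by simpa using h
        simp [fset, hm]
        omega
    simp only [dict7, PySem.Dict.mk.injEq, List.cons.injEq, Prod.mk.injEq, List.length_cons]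
    and_intros <;> first
      | rfl
      | trivial
      | (rw [hc]; push_cast; split_ifs <;> ring)

-- a nodup set counts each element 0 or 1 times
theorem count_ofList (X : List Int) (d : Int) :
    ((PySem.Set.ofList X).count d : Int)
    = (if PySem.Set.contains (PySem.Set.ofList X) d = false then 0 else 1) := by
  by_cases hm : d ∈ PySem.Set.ofList X
  · have hmX : d ∈ X := by simpa [PySem.Set.mem_ofList] using hm
    have h1 : (PySem.Set.ofList X).count d = 1 :=
      List.count_eq_one_of_mem (PySem.Set.nodup_ofList X) hm
    simp [pysem, hmX]
  · have hmX : d ∉ X := by simpa [PySem.Set.mem_ofList] using hm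
    have h0 : (PySem.Set.ofList X).count d = 0 := List.count_eq_zero_of_not_mem hm
    simp [h0, pysem, hmX]

-- B's counter loop, characterised: the counter holds, per day, the number of guards forbidding it
theorem lemB (gs : List (Int × List (String × List Int))) (d : Int) :
    ∀ (fc : PySem.Dict Int Int),
    (gs.foldl (fun fc g =>
        (PySem.Set.ofList ((PySem.Dict.mk g.2).getD "forbiddens" [])).foldl
          (fun fc d => fc.insert d (fc.getD d 0 + 1)) fc) fc).getD d 0
    = fc.getD d 0 + cntIn gs d := by
  induction gs with
  | nil => intro fc; simp [cntIn]
  | cons g gs ih =>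
    intro fc
    simp only [List.foldl]
    rw [ih, PySem.Dict.getD_foldl_insert_add_one, count_ofList]
    have hc : (cntIn (g :: gs) d : Int)
        = (if PySem.Set.contains (PySem.Set.ofList ((PySem.Dict.mk g.2).getD "forbiddens" [])) d = false
           then 0 else 1) + cntIn gs d := by
      simp only [cntIn, List.countP_cons]
      cases h : PySem.Set.contains (PySem.Set.ofList ((PySem.Dict.mk g.2).getD "forbiddens" [])) d
      · have hm : d ∉ (PySem.Dict.mk g.2).getD "forbiddens" [] := by simpa using h
        simp [fset, hm]
      · have hm : d ∈ (PySem.Dict.mk g.2).getD "forbiddens" [] := by simpa using h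
        simp [fset, hm]
        omega
    rw [hc]
    ring

-- ===== VERDICT (by name: the statement is the Claim_ definition above) =====
theorem init_guards_quantity_per_weekday_py_spec : Claim_equal_init_guards_quantity_per_weekday_py := by
  intro guards _ _
  unfold Spec_init_guards_quantity_per_weekday_py
  unfold init_guards_quantity_per_weekday_py init_guards_quantity_per_weekday_py_alt
  simp only []
  rw [show PySem.Dict.mk [((1:Int),(0:Int)),(2,0),(3,0),(4,0),(5,0),(6,0),(7,0)] = dict7 0 0 0 0 0 0 0 from rfl]
  rw [lemA]
  have hr : PySem.List.pyRange 1 8 1 = [1,2,3,4,5,6,7] := by decide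
  rw [hr]
  simp only [List.map]
  have hb : ∀ d : Int,
      (guards.foldl (fun fc g =>
          (PySem.Set.ofList ((PySem.Dict.mk g.2).getD "forbiddens" [])).foldl
            (fun fc d => fc.insert d (fc.getD d 0 + 1)) fc) (PySem.Dict.mk [])).getD d 0
      = (cntIn guards d : Int) := by
    intro d
    rw [lemB]
    simp [pysem]
  simp only [dict7, hb 1, hb 2, hb 3, hb 4, hb 5, hb 6, hb 7]
  norm_num
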